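-- pv_equiv track=rewrite | github.com/Ezra-Alexander/quantum_dots | Structure Analysis/count_bonds_oxides.py | good_index
-- ===== SOURCE A (Python) =====
-- def good_index(i, atoms, target):
-- 	n_in = 0
-- 	n_p = 0
-- 	n_f = 0
-- 	for j, atom in enumerate(atoms):
-- 		if atom == "In" and target == "In":
-- 			n_in=n_in+1
-- 			if j==i:
-- 				return n_in
-- 		if atom == "P" and target == "P":
-- 			n_p=n_p+1
-- 			if j==i:
-- 				return n_p
-- 		if atom == "F" and target == "F":
-- 			n_f=n_f+1
-- 			if j==i:
-- 				return n_f
-- ===== SOURCE B (Python) =====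
-- def good_index(i, atoms, target):
--     if target not in ("In", "P", "F"):
--         return None
--     if i < 0 or i >= len(atoms):
--         return None
--     if atoms[i] != target:
--         return None
--     return atoms[:i + 1].count(target)
-- ===== Notes on version B (the rewrite author's own statement) =====
-- stated objective: simpler
-- what changed: Replaced the interleaved three-counter count-and-early-return loop by an explicit eligibility guard (target in {'In','P','F'}, 0<=i<len(atoms), atoms[i]==target, else None) followed by a single bounded prefix count of target in atoms[:i+1].
import Mathlib
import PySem

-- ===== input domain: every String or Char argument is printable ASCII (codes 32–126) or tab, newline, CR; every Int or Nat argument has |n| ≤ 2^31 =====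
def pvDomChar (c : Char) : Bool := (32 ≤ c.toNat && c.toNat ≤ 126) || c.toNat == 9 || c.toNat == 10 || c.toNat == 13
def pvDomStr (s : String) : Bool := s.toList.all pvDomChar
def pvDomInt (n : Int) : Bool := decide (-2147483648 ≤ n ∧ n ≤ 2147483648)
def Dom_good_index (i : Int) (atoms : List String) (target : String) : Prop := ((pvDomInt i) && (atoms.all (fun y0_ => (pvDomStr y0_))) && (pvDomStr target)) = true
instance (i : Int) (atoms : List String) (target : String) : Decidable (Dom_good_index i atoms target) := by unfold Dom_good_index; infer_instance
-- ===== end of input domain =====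

-- B replaces A's interleaved three-counter count-and-early-return loop by an explicit
-- eligibility guard followed by a bounded prefix count (objective: simpler).


-- ===== PORT A =====
-- the for-loop over enumerate(atoms): j is the enumeration index, the three counters
-- are the loop state; each Python 'if cond: counter += 1; if j == i: return counter'
-- block becomes one let-update plus one early-return test, in the same order
def good_index_go (i : Int) (target : String) : List String → Nat → Int → Int → Int → Option Int
  | [], _, _, _, _ => none
  | atom :: rest, j, n_in, n_p, n_f =>
    let n_in := if atom = "In" ∧ target = "In" then n_in + 1 else n_in
    if atom = "In" ∧ target = "In" ∧ (j : Int) = i then some n_in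
    else
      let n_p := if atom = "P" ∧ target = "P" then n_p + 1 else n_p
      if atom = "P" ∧ target = "P" ∧ (j : Int) = i then some n_p
      else
        let n_f := if atom = "F" ∧ target = "F" then n_f + 1 else n_f
        if atom = "F" ∧ target = "F" ∧ (j : Int) = i then some n_f
        else good_index_go i target rest (j + 1) n_in n_p n_f

def good_index (i : Int) (atoms : List String) (target : String) : Option Int :=
  good_index_go i target atoms 0 0 0 0

-- ===== PORT B =====
-- guard phase (eligible target, index in range, atoms[i] == target), then a bounded
-- prefix count of target in atoms[:i+1]
def good_index_alt (i : Int) (atoms : List String) (target : String) : Option Int :=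
  if target = "In" ∨ target = "P" ∨ target = "F" then
    if i < 0 ∨ (atoms.length : Int) ≤ i then none
    else if PySem.List.pyGet? atoms i ≠ some target then none
    else some ((atoms.take (i.toNat + 1)).count target)
  else none

-- ===== PRECONDITION & SPEC =====
def Spec_good_index (i : Int) (atoms : List String) (target : String) (out : Option Int) : Prop := out = good_index_alt i atoms target
instance (i : Int) (atoms : List String) (target : String) (out : Option Int) : Decidable (Spec_good_index i atoms target out) := by unfold Spec_good_index; infer_instance

-- ===== CLAIM (what is proved, stated in full; the proofs are below) =====
def Claim_equal_good_index : Prop := ∀ (i : Int) (atoms : List String) (target : String), Dom_good_index i atoms target → Spec_good_index i atoms target (good_index i atoms target)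

-- ===== LEMMAS AND PROOFS =====

-- once the index has passed i, the loop can never return
theorem go_none (i : Int) (t : String) :
    ∀ (l : List String) (j : Nat), i < (j : Int) → ∀ (a b c : Int),
      good_index_go i t l j a b c = none := by
  intro l
  induction l with
  | nil => intro j _ a b c; rfl
  | cons atom rest ih =>
    intro j hij a b c
    have hne : ¬ ((j : Int) = i) := by omega
    simp only [good_index_go]
    rw [if_neg (by tauto), if_neg (by tauto), if_neg (by tauto)]
    exact ih (j + 1) (by push_cast; omega) _ _ _

-- characterisation of the loop for an eligible target, at position i = j + k:
-- only that species' counter matters, and the result is the prefix count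
theorem go_at (t : String) (ht : t = "In" ∨ t = "P" ∨ t = "F") :
    ∀ (l : List String) (j k : Nat) (a b c : Int),
      good_index_go ((j + k : Nat) : Int) t l j a b c =
        (if l[k]? = some t
         then some ((if t = "In" then a else if t = "P" then b else c)
                      + ((l.take (k + 1)).count t))
         else none) := by
  intro l
  induction l with
  | nil => intro j k a b c; simp [good_index_go]
  | cons atom rest ih =>
    intro j k a b c
    match k with
    | 0 =>
      by_cases hat : atom = t
      · subst hat
        rcases ht with h | h | h <;> subst h <;>
          simp [good_index_go]
      · have hnone : good_index_go ((j + 0 : Nat) : Int) t (atom :: rest) j a b c = none := by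
          rcases ht with h | h | h <;> subst h <;>
          · simp only [good_index_go]
            rw [if_neg (by tauto), if_neg (by tauto), if_neg (by tauto)]
            exact go_none _ _ rest (j + 1) (by push_cast; omega) _ _ _
        rw [hnone, if_neg (by simp [hat])]
    | m + 1 =>
      have hne : ¬ (((j : Nat) : Int) = ((j + (m + 1) : Nat) : Int)) := by push_cast; omega
      have hstep : good_index_go ((j + (m + 1) : Nat) : Int) t (atom :: rest) j a b c =
          good_index_go ((j + (m + 1) : Nat) : Int) t rest (j + 1)
            (if atom = "In" ∧ t = "In" then a + 1 else a)
            (if atom = "P" ∧ t = "P" then b + 1 else b)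
            (if atom = "F" ∧ t = "F" then c + 1 else c) := by
        simp only [good_index_go]
        rw [if_neg (by tauto), if_neg (by tauto), if_neg (by tauto)]
      have hcast : ((j + (m + 1) : Nat) : Int) = (((j + 1) + m : Nat) : Int) := by push_cast; ring
      rw [hstep, hcast, ih (j + 1) m]
      simp only [List.getElem?_cons_succ]
      by_cases hk : rest[m]? = some t
      · simp only [if_pos hk]
        have htake : (atom :: rest).take (m + 1 + 1) = atom :: rest.take (m + 1) := rfl
        rw [htake, List.count_cons]
        congr 1
        rcases ht with h | h | h <;> subst h <;>
          by_cases h1 : atom = "In" <;> by_cases h2 : atom = "P" <;>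
            by_cases h3 : atom = "F" <;> simp_all <;> omega
      · simp only [if_neg hk]

-- when target is none of the three species, no branch of the loop ever fires
theorem go_other (i : Int) (target : String) (hIn : target ≠ "In") (hP : target ≠ "P")
    (hF : target ≠ "F") :
    ∀ (l : List String) (j : Nat) (a b c : Int),
      good_index_go i target l j a b c = none := by
  intro l
  induction l with
  | nil => intro j a b c; rfl
  | cons atom rest ih =>
    intro j a b c
    simp [good_index_go, hIn, hP, hF, ih]

-- ===== VERDICT (by name: the statement is the Claim_ definition above) =====
theorem good_index_spec : Claim_equal_good_index := by
  intro i atoms target _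
  unfold Spec_good_index good_index good_index_alt
  by_cases ht : target = "In" ∨ target = "P" ∨ target = "F"
  · rw [if_pos ht]
    by_cases hi : i < 0
    · rw [if_pos (Or.inl hi)]
      exact go_none i target atoms 0 (by omega) 0 0 0
    · replace hi : 0 ≤ i := by omega
      have hi' : i = ((0 + i.toNat : Nat) : Int) := by omega
      have hgo := go_at target ht atoms 0 i.toNat 0 0 0
      rw [← hi'] at hgo
      rw [hgo]
      have hget : PySem.List.pyGet? atoms i = atoms[i.toNat]? :=
        PySem.List.pyGet?_of_nonneg atoms hi
      by_cases hlen : (atoms.length : Int) ≤ i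
      · rw [if_pos (Or.inr hlen), if_neg]
        rw [List.getElem?_eq_none (by omega)]
        simp
      · rw [if_neg (show ¬(i < 0 ∨ (atoms.length : Int) ≤ i) by omega)]
        by_cases hat : atoms[i.toNat]? = some target
        · rw [if_pos hat,
            if_neg (show ¬(PySem.List.pyGet? atoms i ≠ some target) by simp [hget, hat])]
          rcases ht with h | h | h <;> subst h <;> simp
        · rw [if_neg hat,
            if_pos (show PySem.List.pyGet? atoms i ≠ some target by simp [hget, hat])]
  · rw [go_other i target (by tauto) (by tauto) (by tauto), if_neg ht]
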